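-- pv_equiv track=rewrite | github.com/BirchJD/PiRF24L01_2.4GHz_NEO-6_GPS | GPS_NEO_6.py | DisplaySatelliteData
-- ===== SOURCE A (Python) =====
-- def DisplaySatelliteData(SatelliteData):
--    Result = "OBTAINING SATELLITES: [" + str(len(SatelliteData)) + "]\n"
--    Count = 0
--    for Satellite in SatelliteData:
--       Count += 1
--       Result += str(Satellite) + " "
--       if (Count % 3) == 0:
--          Result += "\n"
--    Result += "\n\n"
--    return Result
-- ===== SOURCE B (Python) =====
-- def DisplaySatelliteData(SatelliteData):
--    Result = "OBTAINING SATELLITES: [" + str(len(SatelliteData)) + "]\n"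
--    for i in range(0, len(SatelliteData), 3):
--       chunk = SatelliteData[i:i+3]
--       for s in chunk:
--          Result += str(s) + " "
--       if len(chunk) == 3:
--          Result += "\n"
--    return Result + "\n\n"
-- ===== Notes on version B (the rewrite author's own statement) =====
-- stated objective: alternative
-- what changed: Replaces the per-element counter-and-modulo walk with a grouped traversal over fixed windows of three (slices), appending a newline exactly for full chunks.
import Mathlib
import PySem

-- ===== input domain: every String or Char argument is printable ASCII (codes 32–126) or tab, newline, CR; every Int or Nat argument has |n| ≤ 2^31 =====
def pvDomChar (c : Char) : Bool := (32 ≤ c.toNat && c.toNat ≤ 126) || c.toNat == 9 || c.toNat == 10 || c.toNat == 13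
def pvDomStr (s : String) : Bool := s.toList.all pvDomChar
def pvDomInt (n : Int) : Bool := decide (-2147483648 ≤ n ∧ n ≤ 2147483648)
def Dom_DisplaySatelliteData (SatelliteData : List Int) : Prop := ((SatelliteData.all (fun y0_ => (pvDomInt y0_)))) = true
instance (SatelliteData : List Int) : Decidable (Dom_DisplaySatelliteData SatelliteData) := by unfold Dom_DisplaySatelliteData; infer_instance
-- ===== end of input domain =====

-- B replaces A's per-element counter-and-modulo walk with a grouped traversal in windows
-- of three (same cost; objective: alternative decomposition).

-- ===== PORT A =====
-- literal port of A: counter walk, '\n' after every third element (Count % 3 == 0)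
def pvStepA (p : String × Int) (sat : Int) : String × Int :=
  let count := p.2 + 1
  let r := p.1 ++ PySem.Int.toStr sat ++ " "
  let r := if PySem.Int.mod count 3 == 0 then r ++ "\n" else r
  (r, count)

def DisplaySatelliteData (SatelliteData : List Int) : String :=
  let init := "OBTAINING SATELLITES: [" ++ PySem.Int.toStr SatelliteData.length ++ "]\n"
  let st := SatelliteData.foldl pvStepA (init, 0)
  st.1 ++ "\n\n"

-- ===== PORT B =====
-- B: grouped traversal — consume the list in windows of three; newline only for full windows
def pvChunkStr (chunk : List Int) : String :=
  chunk.foldl (fun r s => r ++ PySem.Int.toStr s ++ " ") ""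

def pvLines : List Int → String
  | a :: b :: c :: rest => pvChunkStr [a, b, c] ++ "\n" ++ pvLines rest
  | xs => pvChunkStr xs

def DisplaySatelliteData_alt (SatelliteData : List Int) : String :=
  "OBTAINING SATELLITES: [" ++ PySem.Int.toStr SatelliteData.length ++ "]\n"
    ++ pvLines SatelliteData ++ "\n\n"

-- ===== PRECONDITION & SPEC =====
def Spec_DisplaySatelliteData (SatelliteData : List Int) (out : String) : Prop := out = DisplaySatelliteData_alt SatelliteData
instance (SatelliteData : List Int) (out : String) : Decidable (Spec_DisplaySatelliteData SatelliteData out) := by unfold Spec_DisplaySatelliteData; infer_instance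

-- ===== CLAIM (what is proved, stated in full; the proofs are below) =====
def Claim_equal_DisplaySatelliteData : Prop := ∀ (SatelliteData : List Int), Dom_DisplaySatelliteData SatelliteData → Spec_DisplaySatelliteData SatelliteData (DisplaySatelliteData SatelliteData)

-- ===== LEMMAS AND PROOFS =====

-- ===== VERDICT (by name: the statement is the Claim_ definition above) =====
theorem pvStepA_eq (r : String) (c sat : Int) :
    pvStepA (r, c) sat =
      (if PySem.Int.mod (c + 1) 3 == 0 then r ++ PySem.Int.toStr sat ++ " " ++ "\n"
       else r ++ PySem.Int.toStr sat ++ " ", c + 1) := rfl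

-- the fold of A starting from any count divisible by 3 produces r ++ pvLines l
theorem pvLoop_eq (l : List Int) : ∀ (r : String) (c : Int), PySem.Int.mod c 3 = 0 →
    (l.foldl pvStepA (r, c)).1 = r ++ pvLines l := by
  have m0 : (0:Int) < 3 := by omega
  induction l using pvLines.induct with
  | case1 a b c rest ih =>
    intro r c0 h0
    rw [PySem.Int.mod_eq_emod_of_pos m0] at h0
    have h1 : ¬ ((PySem.Int.mod (c0 + 1) 3 == 0) = true) := by
      simp; omega
    have h2 : ¬ ((PySem.Int.mod (c0 + 1 + 1) 3 == 0) = true) := by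
      simp; omega
    have h3 : (PySem.Int.mod (c0 + 1 + 1 + 1) 3 == 0) = true := by
      simp; omega
    rw [List.foldl_cons, pvStepA_eq, if_neg h1, List.foldl_cons, pvStepA_eq, if_neg h2,
        List.foldl_cons, pvStepA_eq, if_pos h3, ih _ _ (by simpa using h3)]
    simp [pvLines, pvChunkStr, String.append_assoc]
  | case2 xs hne =>
    intro r c0 h0
    rw [PySem.Int.mod_eq_emod_of_pos m0] at h0
    have h1 : ¬ ((PySem.Int.mod (c0 + 1) 3 == 0) = true) := by
      simp; omega
    have h2 : ¬ ((PySem.Int.mod (c0 + 1 + 1) 3 == 0) = true) := by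
      simp; omega
    match xs, hne with
    | [], _ => simp [pvLines, pvChunkStr]
    | [a], _ =>
      rw [List.foldl_cons, pvStepA_eq, if_neg h1]
      simp [pvLines, pvChunkStr, String.append_assoc]
    | [a, b], _ =>
      rw [List.foldl_cons, pvStepA_eq, if_neg h1, List.foldl_cons, pvStepA_eq, if_neg h2]
      simp [pvLines, pvChunkStr, String.append_assoc]
    | a :: b :: c :: rest, hne => exact (hne a b c rest rfl).elim

theorem DisplaySatelliteData_spec : Claim_equal_DisplaySatelliteData := by
  intro l _
  unfold Spec_DisplaySatelliteData DisplaySatelliteData DisplaySatelliteData_alt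
  simp only []
  rw [pvLoop_eq l _ 0 (by decide), String.append_assoc]
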